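-- pv_equiv track=rewrite | github.com/ourSSUNG/algorithms | algorithms/nearestGreater(BrootForce).py | nearestGreater
-- ===== SOURCE A (Python) =====
-- def nearestGreater(a):
--     n = len(a)
--     b = []
--     for i in range(0,n):
--         tmp = a[i]
--         j = i-1
--         k = i+1
--         check = i
--         while(j>=0 or k<n):
--             if j>=0:
--                 if a[j] > tmp:
--                     check = j
--                     break
--                 j = j - 1
--             if k<n:
--                 if a[k] > tmp:
--                     check = k
--                     break
--                 k = k + 1
--         if check == i:
--             b.append(-1)
--         else:
--             b.append(check)
--     return b
-- ===== SOURCE B (Python) =====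
-- def nearestGreater(a):
--     n = len(a)
--     out = []
--     for i in range(n):
--         left = next((j for j in range(i - 1, -1, -1) if a[j] > a[i]), -1)
--         right = next((k for k in range(i + 1, n) if a[k] > a[i]), -1)
--         if left == -1:
--             out.append(right)
--         elif right == -1:
--             out.append(left)
--         else:
--             out.append(left if i - left <= right - i else right)
--     return out
-- ===== Notes on version B (the rewrite author's own statement) =====
-- stated objective: simpler
-- what changed: A interleaves one expanding two-pointer while-loop per element with early break; B instead runs two independent directional scans (nearest greater to the left, nearest greater to the right) and picks the closer index by arithmetic comparison, tie to the left.
import Mathlib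
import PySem

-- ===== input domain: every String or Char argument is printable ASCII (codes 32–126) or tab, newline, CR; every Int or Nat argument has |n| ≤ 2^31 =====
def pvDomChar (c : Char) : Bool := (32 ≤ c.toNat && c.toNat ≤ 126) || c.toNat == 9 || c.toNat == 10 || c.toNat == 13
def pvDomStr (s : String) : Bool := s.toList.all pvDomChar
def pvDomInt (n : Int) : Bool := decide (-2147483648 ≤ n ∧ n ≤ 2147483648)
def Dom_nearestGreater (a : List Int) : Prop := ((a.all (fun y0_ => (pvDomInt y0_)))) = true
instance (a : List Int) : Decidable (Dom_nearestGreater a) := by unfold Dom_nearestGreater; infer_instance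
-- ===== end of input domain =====

-- B replaces A's interleaved two-pointer while-loop by two independent directional scans
-- (nearest greater left / right) combined by a distance comparison, tie to the left (objective: simpler).


-- ===== PORT A =====
-- a[i]; both programs only ever index with a valid index, so the default is never used
def pvGet (a : List Int) (i : Int) : Int := PySem.List.pyGetD a i 0

-- the inner 'while (j>=0 or k<n)' of A, step for step (break = return the found index)
def nearestGreaterLoop (a : List Int) (n tmp : Int) (j k check : Int) : Int :=
  if h : 0 ≤ j ∨ k < n then
    if hj : 0 ≤ j then
      if pvGet a j > tmp then j
      else if hk : k < n then
        if pvGet a k > tmp then k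
        else nearestGreaterLoop a n tmp (j - 1) (k + 1) check
      else nearestGreaterLoop a n tmp (j - 1) k check
    else
      if pvGet a k > tmp then k
      else nearestGreaterLoop a n tmp j (k + 1) check
  else check
termination_by ((j + 1).toNat + (n - k).toNat)
decreasing_by all_goals omega

def nearestGreater (a : List Int) : List Int :=
  let n : Int := a.length
  (PySem.List.pyRange 0 n 1).foldl (fun b i =>
    let tmp := pvGet a i
    let check := nearestGreaterLoop a n tmp (i - 1) (i + 1) i
    if check == i then b ++ [(-1 : Int)] else b ++ [check]) []

-- ===== PORT B =====
def nearestGreater_alt (a : List Int) : List Int :=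
  let n : Int := a.length
  (PySem.List.pyRange 0 n 1).map (fun i =>
    let left := ((PySem.List.pyRange (i - 1) (-1) (-1)).find?
        (fun j => decide (pvGet a i < pvGet a j))).getD (-1)
    let right := ((PySem.List.pyRange (i + 1) n 1).find?
        (fun k => decide (pvGet a i < pvGet a k))).getD (-1)
    if left == -1 then right
    else if right == -1 then left
    else if i - left ≤ right - i then left else right)

-- ===== PRECONDITION & SPEC =====
def Spec_nearestGreater (a : List Int) (out : List Int) : Prop := out = nearestGreater_alt a
instance (a : List Int) (out : List Int) : Decidable (Spec_nearestGreater a out) := by unfold Spec_nearestGreater; infer_instance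

-- ===== CLAIM (what is proved, stated in full; the proofs are below) =====
def Claim_equal_nearestGreater : Prop := ∀ (a : List Int), Dom_nearestGreater a → Spec_nearestGreater a (nearestGreater a)

-- ===== LEMMAS AND PROOFS =====

-- nearest greater index at or left of j (scanning down), and at or right of k (scanning up, below n)
def Lf (a : List Int) (tmp j : Int) : Option Int :=
  (PySem.List.pyRange j (-1) (-1)).find? (fun x => decide (tmp < pvGet a x))
def Rf (a : List Int) (tmp k n : Int) : Option Int :=
  (PySem.List.pyRange k n 1).find? (fun x => decide (tmp < pvGet a x))

theorem Lf_neg {a : List Int} {tmp j : Int} (h : j < 0) : Lf a tmp j = none := by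
  unfold Lf
  rw [PySem.List.pyRange_neg_one_eq_nil (by omega)]
  rfl

theorem Lf_step {a : List Int} {tmp j : Int} (h : 0 ≤ j) :
    Lf a tmp j = if tmp < pvGet a j then some j else Lf a tmp (j - 1) := by
  unfold Lf
  rw [PySem.List.pyRange_neg_one_cons (by omega : (-1 : Int) < j)]
  by_cases hc : tmp < pvGet a j <;> simp [List.find?, hc]

theorem Rf_ge {a : List Int} {tmp k n : Int} (h : n ≤ k) : Rf a tmp k n = none := by
  unfold Rf
  rw [PySem.List.pyRange_one_eq_nil (by omega)]
  rfl

theorem Rf_step {a : List Int} {tmp k n : Int} (h : k < n) :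
    Rf a tmp k n = if tmp < pvGet a k then some k else Rf a tmp (k + 1) n := by
  unfold Rf
  rw [PySem.List.pyRange_one_cons (by omega : k < n)]
  by_cases hc : tmp < pvGet a k <;> simp [List.find?, hc]

theorem Lf_bound {a : List Int} {tmp j l : Int} (h : Lf a tmp j = some l) : 0 ≤ l ∧ l ≤ j := by
  unfold Lf at h
  have hm := List.mem_of_find?_eq_some h
  rw [PySem.List.mem_pyRange_neg_one] at hm
  omega

theorem Rf_bound {a : List Int} {tmp k n r : Int} (h : Rf a tmp k n = some r) : k ≤ r ∧ r < n := by
  unfold Rf at h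
  have hm := List.mem_of_find?_eq_some h
  rw [PySem.List.mem_pyRange_one] at hm
  omega

-- characterisation of A's while loop
theorem loop_eq (a : List Int) (n tmp : Int) : ∀ (j k check : Int),
    nearestGreaterLoop a n tmp j k check =
      match Lf a tmp j, Rf a tmp k n with
      | none, none => check
      | some l, none => l
      | none, some r => r
      | some l, some r => if j - l ≤ r - k then l else r := by
  intro j k check
  induction j, k using nearestGreaterLoop.induct a n tmp with
  | case1 j k h hj hgt =>
    rw [nearestGreaterLoop]
    simp only [dif_pos h, dif_pos hj, if_pos hgt]
    rw [Lf_step hj, if_pos hgt]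
    cases hr : Rf a tmp k n with
    | none => rfl
    | some r =>
      have := Rf_bound hr
      simp only []
      rw [if_pos (by omega)]
  | case2 j k h hj hgt hk hgt2 =>
    rw [nearestGreaterLoop]
    simp only [dif_pos h, dif_pos hj, if_neg hgt, dif_pos hk, if_pos hgt2]
    rw [Lf_step hj, if_neg hgt, Rf_step hk, if_pos hgt2]
    cases hl : Lf a tmp (j - 1) with
    | none => rfl
    | some l =>
      have := Lf_bound hl
      simp only []
      rw [if_neg (by omega)]
  | case3 j k h hj hgt hk hgt2 ih =>
    rw [nearestGreaterLoop]
    simp only [dif_pos h, dif_pos hj, if_neg hgt, dif_pos hk, if_neg hgt2]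
    rw [ih, Lf_step hj, if_neg hgt, Rf_step hk, if_neg hgt2]
    cases hl : Lf a tmp (j - 1) with
    | none => cases hr : Rf a tmp (k + 1) n <;> rfl
    | some l =>
      cases hr : Rf a tmp (k + 1) n with
      | none => rfl
      | some r =>
        simp only []
        by_cases hc : j - 1 - l ≤ r - (k + 1)
        · rw [if_pos hc, if_pos (by omega)]
        · rw [if_neg hc, if_neg (by omega)]
  | case4 j k h hj hgt hk ih =>
    rw [nearestGreaterLoop]
    simp only [dif_pos h, dif_pos hj, if_neg hgt, dif_neg hk]
    rw [ih, Lf_step hj, if_neg hgt, Rf_ge (show (n : Int) ≤ k by omega)]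
    cases hl : Lf a tmp (j - 1) <;> rfl
  | case5 j k h hj hgt =>
    rw [nearestGreaterLoop]
    simp only [dif_pos h, dif_neg hj, if_pos hgt]
    rw [Lf_neg (by omega), Rf_step (by omega : k < n), if_pos hgt]
  | case6 j k h hj hgt ih =>
    rw [nearestGreaterLoop]
    simp only [dif_pos h, dif_neg hj, if_neg hgt]
    rw [ih, Lf_neg (show j < 0 by omega), Rf_step (show k < n by omega), if_neg hgt]
    cases hr : Rf a tmp (k + 1) n <;> rfl
  | case7 j k h =>
    rw [nearestGreaterLoop]
    simp only [dif_neg h]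
    rw [Lf_neg (by omega), Rf_ge (by omega)]

-- per-index agreement of the two programs
theorem point_eq (a : List Int) (n i : Int) :
    (if (nearestGreaterLoop a n (pvGet a i) (i - 1) (i + 1) i) == i then (-1 : Int)
     else nearestGreaterLoop a n (pvGet a i) (i - 1) (i + 1) i) =
    (let left := (Lf a (pvGet a i) (i - 1)).getD (-1)
     let right := (Rf a (pvGet a i) (i + 1) n).getD (-1)
     if left == -1 then right
     else if right == -1 then left
     else if i - left ≤ right - i then left else right) := by
  rw [loop_eq]
  cases hl : Lf a (pvGet a i) (i - 1) with
  | none =>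
    cases hr : Rf a (pvGet a i) (i + 1) n with
    | none => simp
    | some r =>
      have := Rf_bound hr
      simp only [Option.getD_some, Option.getD_none, beq_iff_eq]
      split_ifs <;> omega
  | some l =>
    have hlb := Lf_bound hl
    cases hr : Rf a (pvGet a i) (i + 1) n with
    | none =>
      simp only [Option.getD_some, Option.getD_none, beq_iff_eq]
      split_ifs <;> omega
    | some r =>
      have hrb := Rf_bound hr
      simp only [Option.getD_some, beq_iff_eq]
      split_ifs <;> omega

theorem foldl_push (f : Int → Int) (l : List Int) (acc : List Int) :
    l.foldl (fun b x => b ++ [f x]) acc = acc ++ l.map f := by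
  induction l generalizing acc with
  | nil => simp
  | cons x xs ih => simp [List.foldl, ih]

-- ===== VERDICT (by name: the statement is the Claim_ definition above) =====
theorem nearestGreater_spec : Claim_equal_nearestGreater := by
  intro a _
  unfold Spec_nearestGreater nearestGreater nearestGreater_alt
  simp only []
  have hfun : (fun (b : List Int) (i : Int) =>
      let tmp := pvGet a i
      let check := nearestGreaterLoop a (a.length : Int) tmp (i - 1) (i + 1) i
      if check == i then b ++ [(-1 : Int)] else b ++ [check]) =
      (fun (b : List Int) (i : Int) => b ++
        [if (nearestGreaterLoop a (a.length : Int) (pvGet a i) (i - 1) (i + 1) i) == i then (-1 : Int)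
         else nearestGreaterLoop a (a.length : Int) (pvGet a i) (i - 1) (i + 1) i]) := by
    funext b i
    simp only []
    split <;> rfl
  rw [hfun, foldl_push]
  simp only [List.nil_append]
  apply List.map_congr_left
  intro i _
  rw [point_eq a (a.length : Int) i]
  rfl
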